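-- pv_equiv track=rewrite | github.com/BinaryBand/CryptoPi | util.py | joinBytes
-- ===== SOURCE A (Python) =====
-- from typing import List
--
-- def bytesToNum(arr: List[int], endian='be') -> int:
--     n: int = 0
--
--     if endian == 'be':
--         for a in arr:
--             n = n << 8 | a
--     else:
--         for i, a in enumerate(arr):
--             n += a << (8 * i)
--
--     return n
--
-- def joinBytes(msg: List[int], numBytes: int) -> List[int]:
--     outLength: int = int(len(msg) // numBytes)
--     out: List[int] = [0] * outLength
--
--     for i in range(outLength):
--         k: int = i * numBytes
--         chunk: List[int] = msg[k: k + numBytes]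
--         out[i] = bytesToNum(chunk)
--
--     return out
-- ===== SOURCE B (Python) =====
-- from typing import List
--
-- def joinBytes(msg: List[int], numBytes: int) -> List[int]:
--     # One streaming pass: accumulate bytes big-endian, emit whenever a chunk
--     # of numBytes bytes is complete; a trailing partial chunk is dropped.
--     out: List[int] = []
--     acc: int = 0
--     cnt: int = 0
--     for b in msg:
--         acc = acc << 8 | b
--         cnt += 1
--         if cnt == numBytes:
--             out.append(acc)
--             acc = 0
--             cnt = 0
--     return out
-- ===== Notes on version B (the rewrite author's own statement) =====
-- stated objective: alternative
-- what changed: Replaced the outer chunk loop with per-chunk slicing plus the bytesToNum helper by one flat streaming fold over msg that keeps an accumulator and a byte counter and emits a value each time a chunk completes; no slicing, no division.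
import Mathlib
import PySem

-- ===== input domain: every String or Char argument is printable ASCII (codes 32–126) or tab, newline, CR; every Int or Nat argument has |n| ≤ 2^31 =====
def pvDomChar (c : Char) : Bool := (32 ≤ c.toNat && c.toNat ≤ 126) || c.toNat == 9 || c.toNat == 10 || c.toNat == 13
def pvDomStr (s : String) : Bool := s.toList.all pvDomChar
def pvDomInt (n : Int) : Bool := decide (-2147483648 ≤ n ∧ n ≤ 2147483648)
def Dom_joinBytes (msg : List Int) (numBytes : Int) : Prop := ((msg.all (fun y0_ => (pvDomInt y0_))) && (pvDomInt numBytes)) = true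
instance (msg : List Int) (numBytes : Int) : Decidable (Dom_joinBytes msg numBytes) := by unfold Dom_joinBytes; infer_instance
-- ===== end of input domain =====

-- B replaces A's slice-per-chunk + bytesToNum helper pair by one flat streaming fold
-- over msg with an accumulator and a byte counter (alternative decomposition, same cost).


-- ===== PORT A =====
-- helper bytesToNum (endian keeps its Python default 'be' as an explicit argument)
def bytesToNum (arr : List Int) (endian : String) : Int :=
  if endian = "be" then
    arr.foldl (fun n a => PySem.Int.bor (n <<< 8) a) 0
  else
    (PySem.List.enumerate arr 0).foldl (fun n (p : Int × Int) => n + p.2 <<< (8 * p.1).toNat) 0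

def joinBytes (msg : List Int) (numBytes : Int) : List Int :=
  let outLength : Int := PySem.Int.floordiv (msg.length : Int) numBytes
  (PySem.List.pyRange 0 outLength 1).map (fun i =>
    let k : Int := i * numBytes
    bytesToNum (PySem.List.slice msg (some k) (some (k + numBytes))) "be")

-- ===== PORT B =====
-- B's loop body: state (out, acc, cnt)
def jbStep (numBytes : Int) (s : List Int × Int × Int) (b : Int) : List Int × Int × Int :=
  let acc := PySem.Int.bor (s.2.1 <<< 8) b
  let cnt := s.2.2 + 1
  if cnt = numBytes then (s.1 ++ [acc], 0, 0) else (s.1, acc, cnt)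

def joinBytes_alt (msg : List Int) (numBytes : Int) : List Int :=
  (msg.foldl (jbStep numBytes) ([], 0, 0)).1

-- ===== PRECONDITION & SPEC =====
-- Pre_ excludes exactly numBytes = 0, where Python A raises ZeroDivisionError.
def Pre_joinBytes (msg : List Int) (numBytes : Int) : Prop := numBytes ≠ 0
instance (msg : List Int) (numBytes : Int) : Decidable (Pre_joinBytes msg numBytes) := by unfold Pre_joinBytes; infer_instance
def pvWitness_joinBytes : List Int × Int := ([1, 2, 3, 4, 5], 2)

def Spec_joinBytes (msg : List Int) (numBytes : Int) (out : List Int) : Prop := out = joinBytes_alt msg numBytes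
instance (msg : List Int) (numBytes : Int) (out : List Int) : Decidable (Spec_joinBytes msg numBytes out) := by unfold Spec_joinBytes; infer_instance

-- ===== CLAIM (what is proved, stated in full; the proofs are below) =====
def Claim_equal_joinBytes : Prop := ∀ (msg : List Int) (numBytes : Int), Dom_joinBytes msg numBytes → Pre_joinBytes msg numBytes → Spec_joinBytes msg numBytes (joinBytes msg numBytes)
-- ===== LEMMAS AND PROOFS =====

-- common big-endian accumulation
def beAcc (acc : Int) (xs : List Int) : Int :=
  xs.foldl (fun n a => PySem.Int.bor (n <<< 8) a) acc

-- reference chunking both ports are reduced to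
def chunksJB (nb : Nat) (msg : List Int) : List Int :=
  if h : 0 < nb ∧ nb ≤ msg.length then
    beAcc 0 (msg.take nb) :: chunksJB nb (msg.drop nb)
  else []
termination_by msg.length
decreasing_by simp; omega

theorem foldB_prefix (nb : Int) (msg : List Int) (out : List Int) (acc cnt : Int) :
    (msg.foldl (jbStep nb) (out, acc, cnt)).1 = out ++ (msg.foldl (jbStep nb) ([], acc, cnt)).1 := by
  induction msg generalizing out acc cnt with
  | nil => simp
  | cons x xs ih =>
    simp only [List.foldl_cons, jbStep]
    split_ifs with h
    · rw [ih, ih ([] ++ [PySem.Int.bor (acc <<< 8) x])]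
      simp
    · rw [ih, ih]

theorem foldB_small (nb : Int) (msg : List Int) (out : List Int) (acc cnt : Int)
    (h0 : 0 ≤ cnt) (h : cnt + msg.length < nb ∨ nb < 0) :
    (msg.foldl (jbStep nb) (out, acc, cnt)).1 = out := by
  induction msg generalizing out acc cnt with
  | nil => rfl
  | cons x xs ih =>
    simp only [List.foldl_cons, jbStep]
    have hne : ¬ (cnt + 1 = nb) := by
      rcases h with h | h
      · simp at h; omega
      · omega
    simp only [if_neg hne]
    apply ih _ _ _ (by omega)
    rcases h with h | h
    · left; simp at h ⊢; omega
    · right; exact h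

theorem foldB_complete (nb : Int) (xs : List Int) (out : List Int) (acc cnt : Int)
    (h0 : 0 ≤ cnt) (hlen : cnt + xs.length = nb) (hne : 1 ≤ xs.length) :
    xs.foldl (jbStep nb) (out, acc, cnt) = (out ++ [beAcc acc xs], 0, 0) := by
  induction xs generalizing out acc cnt with
  | nil => simp at hne
  | cons x rest ih =>
    simp only [List.foldl_cons, jbStep]
    cases rest with
    | nil =>
      have : cnt + 1 = nb := by simpa using hlen
      simp only [this, if_pos rfl]
      simp [beAcc]
    | cons y rs =>
      have hlt : ¬ (cnt + 1 = nb) := by simp at hlen; omega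
      simp only [if_neg hlt]
      rw [ih _ _ _ (by omega) (by simp at hlen ⊢; omega) (by simp)]
      simp [beAcc]

theorem B_eq_chunks (nb : Int) (hnb : 1 ≤ nb) (msg : List Int) :
    joinBytes_alt msg nb = chunksJB nb.toNat msg := by
  generalize hL : msg.length = L
  induction L using Nat.strong_induction_on generalizing msg with
  | _ L ih =>
    subst hL
    by_cases h : nb.toNat ≤ msg.length
    · have hsplit := List.take_append_drop nb.toNat msg
      rw [chunksJB]
      rw [dif_pos ⟨by omega, h⟩]
      unfold joinBytes_alt
      conv_lhs => rw [← hsplit]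
      rw [List.foldl_append]
      rw [foldB_complete nb _ _ _ _ le_rfl
        (by simp [List.length_take]; omega) (by simp [List.length_take]; omega)]
      rw [foldB_prefix]
      have := ih (msg.drop nb.toNat).length (by simp [List.length_drop]; omega) (msg.drop nb.toNat) rfl
      unfold joinBytes_alt at this
      rw [this]
      simp
    · rw [chunksJB, dif_neg (by omega)]
      unfold joinBytes_alt
      exact foldB_small nb msg [] 0 0 le_rfl (Or.inl (by simp; omega))

theorem A_eq_chunks (nb : Int) (hnb : 1 ≤ nb) (msg : List Int) :
    joinBytes msg nb = chunksJB nb.toNat msg := by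
  have hfd : PySem.Int.floordiv (msg.length : Int) nb = ((msg.length / nb.toNat : Nat) : Int) := by
    have : (nb.toNat : Int) = nb := by omega
    rw [← this]
    exact_mod_cast PySem.Int.floordiv_natCast msg.length nb.toNat
  simp only [joinBytes]
  rw [hfd, PySem.List.pyRange_one]
  simp only [zero_add, sub_zero, Int.toNat_natCast]
  clear hfd
  -- now: map over List.range (msg.length / nb.toNat)
  generalize hL : msg.length = L
  induction L using Nat.strong_induction_on generalizing msg with
  | _ L ih =>
    subst hL
    by_cases h : nb.toNat ≤ msg.length
    · have hq : msg.length / nb.toNat = (msg.drop nb.toNat).length / nb.toNat + 1 := by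
        rw [List.length_drop]
        rcases Nat.exists_eq_add_of_le h with ⟨m, hm⟩
        rw [hm]
        rw [Nat.add_sub_cancel_left, Nat.add_comm, Nat.add_div_right _ (by omega)]
      rw [hq, List.range_succ_eq_map, List.map_cons, List.map_map, List.map_cons]
      rw [chunksJB, dif_pos ⟨by omega, h⟩]
      congr 1
      · -- head chunk
        show bytesToNum (PySem.List.slice msg (some (0 * nb)) (some (0 * nb + nb))) "be" = _
        rw [zero_mul, zero_add]
        rw [show PySem.List.slice msg (some 0) (some nb) = PySem.List.slice msg none (some nb) by
              simp]
        rw [PySem.List.slice_to msg (show (0:Int) ≤ nb by omega)]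
        simp [bytesToNum, beAcc]
      · -- tail chunks
        have htail := ih (msg.drop nb.toNat).length (by simp [List.length_drop]; omega)
          (msg.drop nb.toNat) rfl
        rw [← htail]
        simp only [List.map_map]
        apply List.map_congr_left
        intro k hk
        simp only [Function.comp_apply, Nat.succ_eq_add_one]
        have hc : (nb.toNat : Int) = nb := by omega
        have hcast : (((k + 1 : Nat)) : Int) * nb = (((k + 1) * nb.toNat : Nat) : Int) := by
          push_cast; rw [hc]
        have hcast2 : (((k + 1 : Nat)) : Int) * nb + nb
            = (((k + 1) * nb.toNat + nb.toNat : Nat) : Int) := by push_cast; rw [hc]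
        have hcast3 : ((k : Nat) : Int) * nb = ((k * nb.toNat : Nat) : Int) := by
          push_cast; rw [hc]
        have hcast4 : ((k : Nat) : Int) * nb + nb = ((k * nb.toNat + nb.toNat : Nat) : Int) := by
          push_cast; rw [hc]
        rw [hcast2, hcast, PySem.List.slice_natCast, hcast4, hcast3, PySem.List.slice_natCast]
        congr 2
        · omega
        · rw [List.drop_drop]
          congr 1
          ring
    · have : msg.length / nb.toNat = 0 := Nat.div_eq_of_lt (by omega)
      rw [this, chunksJB, dif_neg (by omega)]
      simp

theorem A_eq_B_neg (nb : Int) (hnb : nb < 0) (msg : List Int) :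
    joinBytes msg nb = joinBytes_alt msg nb := by
  have hB : joinBytes_alt msg nb = [] :=
    foldB_small nb msg [] 0 0 le_rfl (Or.inr hnb)
  have hA : joinBytes msg nb = [] := by
    simp only [joinBytes]
    have hle : PySem.Int.floordiv (msg.length : Int) nb ≤ 0 := by
      by_cases h0 : (msg.length : Int) = 0
      · simp [h0, PySem.Int.floordiv]
      · have h1 : 0 < (msg.length : Int) := by positivity
        have hmm := PySem.Int.floordiv_mul_add_mod (msg.length : Int) nb
        have hmod := PySem.Int.mod_neg_bounds (msg.length : Int) hnb
        by_contra hc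
        push_neg at hc
        nlinarith [hmod.1, hmod.2]
    rw [show PySem.List.pyRange 0 (PySem.Int.floordiv (msg.length : Int) nb) 1
          = [] from by
        rw [PySem.List.pyRange_one]
        have : (PySem.Int.floordiv (msg.length : Int) nb - 0).toNat = 0 := by omega
        rw [this]; simp]
    simp
  rw [hA, hB]

-- ===== VERDICT (by name: the statement is the Claim_ definition above) =====
theorem joinBytes_spec : Claim_equal_joinBytes := by
  intro msg nb _ hpre
  unfold Spec_joinBytes
  rcases lt_trichotomy nb 0 with h | h | h
  · exact A_eq_B_neg nb h msg
  · exact absurd h hpre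
  · rw [A_eq_chunks nb (by omega), B_eq_chunks nb (by omega)]
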